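-- pv_equiv track=rewrite | github.com/JonahF127/Nonlinear | svm.py | flagged_bigrams_count
-- ===== SOURCE A (Python) =====
-- import string
--
-- def flagged_bigrams_count(email):
--     # remove punctuation from email
--     text = email.translate(str.maketrans('', '', string.punctuation))
--
--     # make text lowercase
--     lowercase_text = text.lower()
--
--     # make the list of common bigrams in spam
--     flagged_bigrams = [
--         "click here",
--         "limited time",
--         "act now",
--         "have won"
--     ]
--
--
--     # Compare the email with flagged_bigrams
--     words = lowercase_text.split()
--     bigrams = []
--     for i in range(len(words) - 1):
--         bigrams.append(f"{words[i]} {words[i+1]}")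
--
--     flagged_bigram_count = sum(1 for bigram in bigrams if bigram in flagged_bigrams)
--     return flagged_bigram_count
-- ===== SOURCE B (Python) =====
-- import string
--
-- def flagged_bigrams_count(email):
--     # Normalize exactly as A: strip punctuation, lowercase, split on whitespace.
--     words = email.translate(str.maketrans('', '', string.punctuation)).lower().split()
--     # Inverted positional index: word -> list of positions where it occurs.
--     pos = {}
--     for i, w in enumerate(words):
--         pos.setdefault(w, []).append(i)
--     # Count each flagged bigram by intersecting the first word's positions
--     # with the (shifted) second word's position set; no bigram is ever built.
--     total = 0
--     for first, second in [("click", "here"), ("limited", "time"),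
--                           ("act", "now"), ("have", "won")]:
--         nxt = set(pos.get(second, []))
--         total += sum(1 for i in pos.get(first, []) if i + 1 in nxt)
--     return total
-- ===== Notes on version B (the rewrite author's own statement) =====
-- stated objective: alternative
-- what changed: B never builds bigram strings: it builds an inverted positional index (word -> list of positions) in one pass, then answers each of the four flagged bigrams by intersecting the first word's position list with the second word's shifted position set, instead of A's pass that materializes every adjacent-word bigram string and membership-tests it against the flag list.
import Mathlib
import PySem

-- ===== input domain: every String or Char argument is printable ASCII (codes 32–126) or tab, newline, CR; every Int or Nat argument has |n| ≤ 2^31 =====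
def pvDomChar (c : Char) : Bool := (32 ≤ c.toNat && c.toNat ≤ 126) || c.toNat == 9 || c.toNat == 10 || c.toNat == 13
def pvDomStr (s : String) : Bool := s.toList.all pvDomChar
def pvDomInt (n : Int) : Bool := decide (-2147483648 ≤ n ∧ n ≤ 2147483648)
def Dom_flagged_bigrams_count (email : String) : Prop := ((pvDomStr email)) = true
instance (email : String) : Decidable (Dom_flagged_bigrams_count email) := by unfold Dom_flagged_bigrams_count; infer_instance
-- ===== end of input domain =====

-- B replaces A's materialized adjacent-bigram strings + membership tests by an inverted
-- positional index (word -> positions) probed for the four flagged word pairs (objective: alternative).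

-- string.punctuation (module constant used by both programs)
def pvPunct : List Char := "!\"#$%&'()*+,-./:;<=>?@[\\]^_`{|}~".toList

-- ===== PORT A =====
def flagged_bigrams_count (email : String) : Int :=
  -- email.translate(str.maketrans('', '', string.punctuation)): exact — deletes exactly the punctuation chars
  let text := String.ofList (email.toList.filter (fun c => !(pvPunct.contains c)))
  let lowercase_text := PySem.Str.lower text
  let flagged_bigrams : List String := ["click here", "limited time", "act now", "have won"]
  let words := PySem.Str.split₀ lowercase_text
  -- for i in range(len(words)-1): bigrams.append(f"{words[i]} {words[i+1]}")  (indices always in range)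
  let bigrams := (PySem.List.pyRange 0 ((words.length : Int) - 1) 1).foldl
    (fun acc i => acc ++ [PySem.List.pyGetD words i "" ++ " " ++ PySem.List.pyGetD words (i + 1) ""]) []
  -- sum(1 for bigram in bigrams if bigram in flagged_bigrams)
  bigrams.foldl (fun acc bigram => if flagged_bigrams.contains bigram then acc + 1 else acc) 0

-- ===== PORT B =====
def flagged_bigrams_count_alt (email : String) : Int :=
  let words := PySem.Str.split₀ (PySem.Str.lower
    (String.ofList (email.toList.filter (fun c => !(pvPunct.contains c)))))
  -- for i, w in enumerate(words): pos.setdefault(w, []).append(i)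
  let pos := (PySem.List.enumerate words).foldl
    (fun (d : PySem.Dict String (List Int)) p => d.modify p.2 [] (· ++ [p.1])) PySem.Dict.empty
  -- for first, second in flagged pairs: intersect pos[first] with shifted set(pos[second])
  ([("click", "here"), ("limited", "time"), ("act", "now"), ("have", "won")] : List (String × String)).foldl
    (fun total fp =>
      let nxt := PySem.Set.ofList (pos.getD fp.2 [])
      total + (pos.getD fp.1 []).foldl
        (fun acc i => if PySem.Set.contains nxt (i + 1) then acc + 1 else acc) 0) 0

-- ===== PRECONDITION & SPEC =====
def Spec_flagged_bigrams_count (email : String) (out : Int) : Prop := out = flagged_bigrams_count_alt email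
instance (email : String) (out : Int) : Decidable (Spec_flagged_bigrams_count email out) := by unfold Spec_flagged_bigrams_count; infer_instance

-- ===== CLAIM (what is proved, stated in full; the proofs are below) =====
def Claim_equal_flagged_bigrams_count : Prop := ∀ (email : String), Dom_flagged_bigrams_count email → Spec_flagged_bigrams_count email (flagged_bigrams_count email)

-- ===== LEMMAS AND PROOFS =====

-- the positions of word a in ws (what B's index stores under key a)
def pvIdx (ws : List String) (a : String) : List Int :=
  ((PySem.List.enumerate ws).filter (fun p => p.2 == a)).map (·.1)

theorem pv_bigrams_eq {α β : Type} (ws : List α) (d : α) (g : α → α → β) :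
    (PySem.List.pyRange 0 ((ws.length : Int) - 1) 1).map
      (fun i => g (PySem.List.pyGetD ws i d) (PySem.List.pyGetD ws (i + 1) d))
    = (ws.zip ws.tail).map (fun p => g p.1 p.2) := by
  cases ws with
  | nil => simp [PySem.List.pyRange]
  | cons x xs =>
    have h1 : ((x :: xs).length : Int) - 1 = (xs.length : Int) := by
      push_cast [List.length_cons]; ring
    rw [h1, PySem.List.pyRange_zero_natCast]
    rw [List.map_map]
    apply List.ext_getElem
    · simp
    · intro i h1' h2'
      simp only [List.getElem_map, List.getElem_range, Function.comp_apply,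
        List.getElem_zip, List.getElem_tail]
      have hi : i < xs.length := by simpa using h1'
      have e1 : PySem.List.pyGetD (x :: xs) ((i : Int)) d = (x :: xs)[i] := by
        rw [PySem.List.pyGetD_natCast]
        exact List.getD_eq_getElem _ _ (by simp; omega)
      have e2 : PySem.List.pyGetD (x :: xs) ((i : Int) + 1) d = (x :: xs)[i + 1] := by
        have : ((i : Int) + 1) = ((i + 1 : Nat) : Int) := by push_cast; ring
        rw [this, PySem.List.pyGetD_natCast]
        exact List.getD_eq_getElem _ _ (by simp; omega)
      rw [e1, e2]

theorem pv_split_go_no_space (s : List Char) : ∀ (cur : List Char) (acc : List (List Char)),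
    (∀ c ∈ cur, PySem.Chars.isspace c = false) →
    (∀ w ∈ acc, ∀ c ∈ w, PySem.Chars.isspace c = false) →
    ∀ w ∈ PySem.Chars.split₀.go s cur acc, ∀ c ∈ w, PySem.Chars.isspace c = false := by
  induction s with
  | nil =>
    intro cur acc hcur hacc w hw
    simp only [PySem.Chars.split₀.go] at hw
    split at hw
    · simp only [List.mem_reverse] at hw; exact hacc w hw
    · simp only [List.mem_reverse, List.mem_cons] at hw
      rcases hw with h | h
      · subst h; intro c hc; exact hcur c (by simpa using hc)
      · exact hacc w h
  | cons c rest ih =>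
    intro cur acc hcur hacc w hw
    simp only [PySem.Chars.split₀.go] at hw
    split at hw
    · split at hw
      · exact ih [] acc (by simp) hacc w hw
      · refine ih [] (cur.reverse :: acc) (by simp) ?_ w hw
        intro v hv
        rcases List.mem_cons.mp hv with h | h
        · subst h; intro d hd; exact hcur d (by simpa using hd)
        · exact hacc v h
    · refine ih (c :: cur) acc ?_ hacc w hw
      intro d hd
      rcases List.mem_cons.mp hd with h | h
      · subst h; rename_i hns; simpa using hns
      · exact hcur d h

theorem pv_split_no_space (s : String) :
    ∀ w ∈ PySem.Str.split₀ s, (' ' : Char) ∉ w.toList := by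
  intro w hw
  simp only [PySem.Str.split₀, List.mem_map] at hw
  obtain ⟨l, hl, rfl⟩ := hw
  have := pv_split_go_no_space s.toList [] [] (by simp) (by simp) l hl
  intro hsp
  have h2 := this ' ' (by simpa using hsp)
  simp [PySem.Chars.isspace] at h2

theorem pv_space_split (xs : List Char) (ys : List Char) (as bs : List Char)
    (hx : (' ' : Char) ∉ xs) (ha : (' ' : Char) ∉ as) :
    xs ++ ' ' :: ys = as ++ ' ' :: bs ↔ xs = as ∧ ys = bs := by
  induction xs generalizing as with
  | nil =>
    cases as with
    | nil => simp
    | cons a as' =>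
      simp only [List.nil_append, List.cons_append, List.cons.injEq]
      constructor
      · rintro ⟨h1, h2⟩; exact absurd (h1 ▸ List.mem_cons_self) ha
      · rintro ⟨h, _⟩; exact absurd h (by simp)
  | cons x xs' ih =>
    cases as with
    | nil =>
      simp only [List.nil_append, List.cons_append, List.cons.injEq]
      constructor
      · rintro ⟨h1, h2⟩; exact absurd (h1 ▸ List.mem_cons_self) hx
      · rintro ⟨h, _⟩; exact absurd h (by simp)
    | cons a as' =>
      simp only [List.cons_append, List.cons.injEq]
      rw [ih as' (by simp at hx; tauto) (by simp at ha; tauto)]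
      tauto

theorem pv_bigram_eq_iff (x y a b : String)
    (hx : (' ' : Char) ∉ x.toList) (ha : (' ' : Char) ∉ a.toList) :
    (x ++ " " ++ y = a ++ " " ++ b) ↔ (x = a ∧ y = b) := by
  rw [← String.toList_inj, ← String.toList_inj (s₁ := x) (s₂ := a), ← String.toList_inj (s₁ := y) (s₂ := b)]
  simp only [String.toList_append]
  have h : (" " : String).toList = [' '] := rfl
  rw [h]
  simp only [List.append_assoc, List.singleton_append]
  exact pv_space_split _ _ _ _ hx ha

theorem pv_mem_idx (ws : List String) (a : String) (x : Int) :
    x ∈ pvIdx ws a ↔ ∃ (k : Nat), ∃ (h : k < ws.length), x = (k : Int) ∧ ws[k] = a := by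
  simp only [pvIdx, List.mem_map, List.mem_filter, PySem.List.mem_enumerate_iff]
  constructor
  · rintro ⟨p, ⟨⟨k, hk, rfl⟩, hpa⟩, rfl⟩
    exact ⟨k, hk, by simp, by simpa using hpa⟩
  · rintro ⟨k, hk, rfl, hka⟩
    exact ⟨((0:Int) + k, ws[k]), ⟨⟨k, hk, rfl⟩, by simpa using hka⟩, by simp⟩

theorem pv_range_count (ws : List String) (a b : String) :
    (List.range ws.length).countP
      (fun (k : Nat) => decide (((k : Int) + 1) ∈ pvIdx ws b) && (ws.getD k "" == a))
    = (List.range (ws.length - 1)).countP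
      (fun (k : Nat) => (ws.getD k "" == a) && (ws.getD (k + 1) "" == b)) := by
  rcases Nat.eq_zero_or_pos ws.length with h0 | hpos
  · simp [h0]
  · obtain ⟨m, hm⟩ : ∃ m, ws.length = m + 1 := ⟨ws.length - 1, by omega⟩
    have hmem : ∀ k : Nat, (((k : Int) + 1) ∈ pvIdx ws b) ↔ (k + 1 < ws.length ∧ ws.getD (k + 1) "" = b) := by
      intro k
      rw [pv_mem_idx]
      constructor
      · rintro ⟨j, hj, hjeq, hjb⟩
        have hjk : j = k + 1 := by exact_mod_cast hjeq.symm
        subst hjk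
        exact ⟨hj, by rw [List.getD_eq_getElem _ _ hj]; exact hjb⟩
      · rintro ⟨hk1, hb⟩
        exact ⟨k + 1, hk1, by push_cast; ring, by rw [← List.getD_eq_getElem _ _ hk1]; exact hb⟩
    have hnm : ¬ (((m : Int) + 1) ∈ pvIdx ws b) := by
      rw [hmem]; omega
    have hc : (List.range m).countP (fun (k : Nat) => decide (((k : Int) + 1) ∈ pvIdx ws b) && (ws.getD k "" == a))
        = (List.range m).countP (fun (k : Nat) => (ws.getD k "" == a) && (ws.getD (k + 1) "" == b)) := by
      apply List.countP_congr
      intro k hk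
      simp only [List.mem_range] at hk
      have hk1 : k + 1 < ws.length := by omega
      simp only [Bool.and_eq_true, decide_eq_true_eq, beq_iff_eq, hmem]
      tauto
    rw [hm, List.range_succ, List.countP_append, Nat.add_sub_cancel, hc]
    simp [hnm]

theorem pv_pair_count (ws : List String) (a b : String) :
    (pvIdx ws a).countP (fun i => PySem.Set.contains (PySem.Set.ofList (pvIdx ws b)) (i + 1))
    = (ws.zip ws.tail).countP (fun p => p.1 == a && p.2 == b) := by
  -- LHS: replace the set-membership test, unfold pvIdx, move to an index count
  have l1 : (pvIdx ws a).countP (fun i => PySem.Set.contains (PySem.Set.ofList (pvIdx ws b)) (i + 1))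
      = (pvIdx ws a).countP (fun i => decide ((i + 1) ∈ pvIdx ws b)) := by
    apply List.countP_congr
    intro i _
    simp [PySem.Set.mem_ofList]
  have l2 : (pvIdx ws a).countP (fun i => decide ((i + 1) ∈ pvIdx ws b))
      = (PySem.List.enumerate ws).countP
          (fun p => decide ((p.1 + 1) ∈ pvIdx ws b) && (p.2 == a)) := by
    simp [pvIdx, List.countP_map, List.countP_filter, Function.comp_def]
  have l3 : (PySem.List.enumerate ws).countP
        (fun p => decide ((p.1 + 1) ∈ pvIdx ws b) && (p.2 == a))
      = (List.range ws.length).countP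
          (fun (k : Nat) => decide (((k : Int) + 1) ∈ pvIdx ws b) && (ws.getD k "" == a)) := by
    rw [PySem.List.enumerate_eq_map_pyRange ws ""]
    rw [PySem.List.len_eq, PySem.List.pyRange_zero_natCast]
    simp [List.countP_map, Function.comp_def]
  -- RHS: express zip(words, words[1:]) as an index count
  have r1 : (ws.zip ws.tail).countP (fun p => p.1 == a && p.2 == b)
      = (List.range (ws.length - 1)).countP
          (fun (k : Nat) => (ws.getD k "" == a) && (ws.getD (k + 1) "" == b)) := by
    have hz := pv_bigrams_eq ws "" (fun x y => (x, y))
    have hz' : (ws.zip ws.tail).map (fun p => (p.1, p.2)) = ws.zip ws.tail := by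
      simp
    rw [hz'] at hz
    rw [← hz]
    cases ws with
    | nil => simp [PySem.List.pyRange]
    | cons x xs =>
      have h1 : (((x :: xs).length : Int) - 1) = ((xs.length : Nat) : Int) := by
        push_cast [List.length_cons]; ring
      rw [h1, PySem.List.pyRange_zero_natCast]
      simp only [List.map_map, List.countP_map, Function.comp_def, List.length_cons,
        Nat.add_sub_cancel]
      apply List.countP_congr
      intro k _
      have e2 : ((k : Int) + 1) = (((k + 1 : Nat)) : Int) := by push_cast; ring
      rw [e2, PySem.List.pyGetD_natCast, PySem.List.pyGetD_natCast]
  rw [l1, l2, l3, r1, pv_range_count]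

theorem pv_countP_four_pairs (l : List (String × String)) :
    l.countP (fun p => (p.1 == "click" && p.2 == "here") || (p.1 == "limited" && p.2 == "time")
      || (p.1 == "act" && p.2 == "now") || (p.1 == "have" && p.2 == "won"))
    = l.countP (fun p => p.1 == "click" && p.2 == "here")
      + l.countP (fun p => p.1 == "limited" && p.2 == "time")
      + l.countP (fun p => p.1 == "act" && p.2 == "now")
      + l.countP (fun p => p.1 == "have" && p.2 == "won") := by
  induction l with
  | nil => simp
  | cons x xs ih =>
    simp only [List.countP_cons, ih]
    by_cases h1 : x.1 = "click" <;> by_cases h2 : x.1 = "limited" <;>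
      by_cases h3 : x.1 = "act" <;> by_cases h4 : x.1 = "have" <;>
      simp_all <;> omega

theorem pv_pos_getD (ws : List String) (a : String) :
    ((PySem.List.enumerate ws).foldl
      (fun (d : PySem.Dict String (List Int)) p => d.modify p.2 [] (· ++ [p.1]))
      PySem.Dict.empty).getD a [] = pvIdx ws a := by
  have h : (PySem.List.enumerate ws).foldl
      (fun (d : PySem.Dict String (List Int)) p => d.modify p.2 [] (· ++ [p.1]))
      PySem.Dict.empty
      = ((PySem.List.enumerate ws).map (fun p => (p.2, p.1))).foldl
        (fun (d : PySem.Dict String (List Int)) q => d.modify q.1 [] (· ++ [q.2]))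
        PySem.Dict.empty := by
    rw [List.foldl_map]
  rw [h, PySem.Dict.getD_foldl_modify_append]
  simp [pvIdx, List.filter_map, List.map_map, Function.comp_def]

set_option maxHeartbeats 1000000 in
theorem pv_main (ws : List String) (hw : ∀ w ∈ ws, (' ' : Char) ∉ w.toList) :
    ((PySem.List.pyRange 0 ((ws.length : Int) - 1) 1).foldl
      (fun acc i => acc ++ [PySem.List.pyGetD ws i "" ++ " " ++ PySem.List.pyGetD ws (i + 1) ""]) []).foldl
      (fun acc bigram => if (["click here", "limited time", "act now", "have won"] : List String).contains bigram then acc + 1 else acc) (0 : Int)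
    = (let pos := (PySem.List.enumerate ws).foldl
        (fun (d : PySem.Dict String (List Int)) p => d.modify p.2 [] (· ++ [p.1])) PySem.Dict.empty
       ([("click", "here"), ("limited", "time"), ("act", "now"), ("have", "won")] : List (String × String)).foldl
        (fun total fp =>
          let nxt := PySem.Set.ofList (pos.getD fp.2 [])
          total + (pos.getD fp.1 []).foldl
            (fun acc i => if PySem.Set.contains nxt (i + 1) then acc + 1 else acc) 0) 0) := by
  -- A side
  rw [PySem.List.foldl_append_singleton_eq_map,
      pv_bigrams_eq ws "" (fun x y => x ++ " " ++ y),
      PySem.List.foldl_if_add_one, List.nil_append]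
  -- rewrite the membership test into the four-pair disjunction
  have hA : ((ws.zip ws.tail).map (fun p => p.1 ++ " " ++ p.2)).countP
        (["click here", "limited time", "act now", "have won"] : List String).contains
      = (ws.zip ws.tail).countP (fun p => (p.1 == "click" && p.2 == "here") || (p.1 == "limited" && p.2 == "time")
          || (p.1 == "act" && p.2 == "now") || (p.1 == "have" && p.2 == "won")) := by
    rw [List.countP_map]
    apply List.countP_congr
    rintro ⟨x, y⟩ hp
    have hx : (' ' : Char) ∉ x.toList := hw x (List.of_mem_zip hp).1
    simp only [Function.comp_apply, List.contains_eq_mem, List.mem_cons, List.not_mem_nil,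
      or_false, decide_eq_true_eq, Bool.or_eq_true, Bool.and_eq_true, beq_iff_eq]
    have e1 : (x ++ " " ++ y = "click here") ↔ (x = "click" ∧ y = "here") :=
      pv_bigram_eq_iff x y "click" "here" hx (by decide)
    have e2 : (x ++ " " ++ y = "limited time") ↔ (x = "limited" ∧ y = "time") :=
      pv_bigram_eq_iff x y "limited" "time" hx (by decide)
    have e3 : (x ++ " " ++ y = "act now") ↔ (x = "act" ∧ y = "now") :=
      pv_bigram_eq_iff x y "act" "now" hx (by decide)
    have e4 : (x ++ " " ++ y = "have won") ↔ (x = "have" ∧ y = "won") :=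
      pv_bigram_eq_iff x y "have" "won" hx (by decide)
    rw [e1, e2, e3, e4]
    tauto
  rw [hA, pv_countP_four_pairs]
  -- B side
  simp only [List.foldl_cons, List.foldl_nil, pv_pos_getD, PySem.List.foldl_if_add_one,
    pv_pair_count]
  push_cast
  ring

-- ===== VERDICT (by name: the statement is the Claim_ definition above) =====
theorem flagged_bigrams_count_spec : Claim_equal_flagged_bigrams_count := by
  intro email _
  show flagged_bigrams_count email = flagged_bigrams_count_alt email
  unfold flagged_bigrams_count flagged_bigrams_count_alt
  exact pv_main _ (pv_split_no_space _)
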